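-- pv_equiv track=rewrite | github.com/RYN6666999/meta-agent | scripts/dedup-lightrag.py | summarize_exact_duplicates
-- ===== SOURCE A (Python) =====
-- from collections import defaultdict
--
-- def summarize_exact_duplicates(entities: list[dict]) -> dict[str, int]:
--     """統計同名重複（名稱完全相同，count>1）"""
--     counter: dict[str, int] = defaultdict(int)
--     for e in entities:
--         name = (e.get("id") or e.get("name") or "").strip()
--         if not name:
--             continue
--         counter[name] += 1
--     return {name: cnt for name, cnt in counter.items() if cnt > 1}
-- ===== SOURCE B (Python) =====
-- def summarize_exact_duplicates(entities: list[dict]) -> dict[str, int]: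
--     """統計同名重複（名稱完全相同，count>1）"""
--     names = []
--     for e in entities:
--         name = (e.get("id") or e.get("name") or "").strip()
--         if name:
--             names.append(name)
--     srt = sorted(names)
--     counts = {}
--     i = 0
--     while i < len(srt):
--         j = i + 1
--         while j < len(srt) and srt[j] == srt[i]:
--             j += 1
--         counts[srt[i]] = j - i
--         i = j
--     out = {}
--     for n in names:
--         if n not in out and counts[n] > 1:
--             out[n] = counts[n]
--     return out
-- ===== Notes on version B (the rewrite author's own statement) =====
-- stated objective: alternative
-- what changed: B replaces A's hash tally with a sort: it sorts the cleaned names, computes each name's multiplicity by a run-length scan over the sorted list, and rebuilds the duplicate dict in first-occurrence order with a seen-check pass.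
import Mathlib
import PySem

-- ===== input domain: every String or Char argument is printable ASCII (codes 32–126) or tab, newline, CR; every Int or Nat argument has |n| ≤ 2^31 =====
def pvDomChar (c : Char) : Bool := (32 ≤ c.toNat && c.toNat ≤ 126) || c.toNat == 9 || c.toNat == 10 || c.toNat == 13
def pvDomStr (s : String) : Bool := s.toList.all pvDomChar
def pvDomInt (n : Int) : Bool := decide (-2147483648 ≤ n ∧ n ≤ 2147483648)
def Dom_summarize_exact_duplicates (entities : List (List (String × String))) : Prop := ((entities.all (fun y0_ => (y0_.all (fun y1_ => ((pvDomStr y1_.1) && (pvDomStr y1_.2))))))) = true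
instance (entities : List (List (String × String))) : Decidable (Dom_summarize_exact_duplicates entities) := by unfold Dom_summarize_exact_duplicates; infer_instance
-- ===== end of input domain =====

-- B replaces A's hash tally with a sort + run-length scan over the sorted names, then rebuilds the
-- duplicate dict in first-occurrence order with a seen check; alternative algorithm, not faster.

-- shared helper: the cleaned name '(e.get("id") or e.get("name") or "").strip()' — both Pythons use this exact expression.
-- 'x or y' is exact here because e.get returns None (→ getD "") or a string, and both None and "" are falsy.
def pvName (e : List (String × String)) : String :=
  let a := ((PySem.Dict.mk e).get? "id").getD ""
  PySem.Str.strip (if a ≠ "" then a else ((PySem.Dict.mk e).get? "name").getD "")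

-- ===== PORT A =====
-- the final dict comprehension is ported as the corresponding insert loop over counter.items
def summarize_exact_duplicates (entities : List (List (String × String))) : List (String × Int) :=
  let counter : PySem.Dict String Int :=
    entities.foldl (fun counter e =>
      let name := pvName e
      if name = "" then counter
      else counter.modify name 0 (· + 1)) PySem.Dict.empty
  (counter.items.foldl (fun d p => if p.2 > 1 then d.insert p.1 p.2 else d)
    PySem.Dict.empty).items

-- ===== PORT B =====
-- the while-loop pair 'i/j' walking the sorted list run by run, ported as the structural
-- recursion over the same runs: takeWhile (· == x) is the inner 'j' loop, j - i = run length
def pvRuns : List String → List (String × Int)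
  | [] => []
  | x :: xs =>
      (x, ((xs.takeWhile (· == x)).length : Int) + 1) :: pvRuns (xs.dropWhile (· == x))
termination_by l => l.length
decreasing_by
  simp only [List.length_cons]
  exact Nat.lt_succ_of_le (List.length_dropWhile_le _ _)

def summarize_exact_duplicates_alt (entities : List (List (String × String))) : List (String × Int) :=
  let names : List String :=
    entities.foldl (fun names e =>
      let name := pvName e
      if name ≠ "" then names ++ [name] else names) []
  let srt := PySem.List.sorted names (fun x => x) false
  let counts : PySem.Dict String Int := PySem.Dict.mk (pvRuns srt)
  -- 'counts[n]' is ported as getD … 0: exact because every n in names occurs in srt, hence in counts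
  (names.foldl (fun out n =>
      if ¬ out.contains n ∧ counts.getD n 0 > 1 then out.insert n (counts.getD n 0) else out)
    PySem.Dict.empty).items

-- ===== PRECONDITION & SPEC =====
def Spec_summarize_exact_duplicates (entities : List (List (String × String))) (out : List (String × Int)) : Prop := out = summarize_exact_duplicates_alt entities
instance (entities : List (List (String × String))) (out : List (String × Int)) : Decidable (Spec_summarize_exact_duplicates entities out) := by unfold Spec_summarize_exact_duplicates; infer_instance

-- ===== CLAIM (what is proved, stated in full; the proofs are below) =====
def Claim_equal_summarize_exact_duplicates : Prop := ∀ (entities : List (List (String × String))), Dom_summarize_exact_duplicates entities → Spec_summarize_exact_duplicates entities (summarize_exact_duplicates entities)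

-- ===== LEMMAS AND PROOFS =====

-- dedup-first (set(xs)) commutes with filtering
lemma ofList_filter (q : String → Bool) (xs : List String) :
    PySem.Set.ofList (xs.filter q) = (PySem.Set.ofList xs).filter q := by
  induction xs with
  | nil => simp [PySem.Set.ofList_nil]
  | cons x xs ih =>
    by_cases h : q x
    · simp only [List.filter_cons, h, if_true, PySem.Set.ofList_cons, ih, PySem.Set.discard,
        List.filter_filter]
      congr 1
      exact List.filter_congr (fun a _ => by by_cases hq : q a <;> simp [hq, Bool.and_comm])
    · simp only [List.filter_cons, h, Bool.false_eq_true, if_false, PySem.Set.ofList_cons, ih,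
        PySem.Set.discard, List.filter_filter]
      exact List.filter_congr (fun a _ => by
        by_cases hax : a = x
        · subst hax; simp [h]
        · simp [hax])

-- the insert loop of a dict comprehension whose value depends only on the key:
-- its items are the distinct keys in first-occurrence order, each with its value
lemma foldl_insert_items (c : String → Int) (l : List String) :
    ((l.foldl (fun d n => d.insert n (c n)) PySem.Dict.empty).items)
      = (PySem.Set.ofList l).map (fun n => (n, c n)) := by
  induction l using List.reverseRecOn with
  | nil => rfl
  | append_singleton xs x ih =>
    rw [List.foldl_append, List.foldl_cons, List.foldl_nil, PySem.Set.ofList_append_singleton]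
    have hkeys : (xs.foldl (fun d n => d.insert n (c n)) PySem.Dict.empty).keys
        = PySem.Set.ofList xs := by
      simp only [PySem.Dict.keys, ih, List.map_map]
      have h1 : ((fun p : String × Int => p.1) ∘ fun n => (n, c n)) = fun n => n := rfl
      rw [h1, List.map_id']
    by_cases hx : x ∈ PySem.Set.ofList xs
    · rw [PySem.Set.add_of_mem hx]
      have hc : (xs.foldl (fun d n => d.insert n (c n)) PySem.Dict.empty).contains x = true := by
        rw [PySem.Dict.contains_iff_mem_keys, hkeys]; exact hx
      rw [PySem.Dict.items_insert_of_contains _ _ hc, ih, List.map_map]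
      exact List.map_congr_left (fun n _ => by
        by_cases hnx : n = x
        · subst hnx; simp
        · simp [hnx])
    · rw [PySem.Set.add_of_not_mem hx]
      have hc : (xs.foldl (fun d n => d.insert n (c n)) PySem.Dict.empty).contains x = false := by
        rw [Bool.eq_false_iff, Ne, PySem.Dict.contains_iff_mem_keys, hkeys]
        exact hx
      rw [PySem.Dict.items_insert_of_not_contains _ _ hc, ih, List.map_append]
      rfl

-- A's entity loop only looks at the cleaned name: it is a loop over the nonempty names
lemma skip_fold (l : List (List (String × String))) (d : PySem.Dict String Int) :
    l.foldl (fun counter e =>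
        let name := pvName e
        if name = "" then counter
        else counter.modify name 0 (· + 1)) d
      = ((l.map (fun e => pvName e)).filter (fun n => n ≠ "")).foldl
          (fun d x => d.modify x 0 (· + 1)) d := by
  induction l generalizing d with
  | nil => rfl
  | cons e l ih => by_cases h : pvName e = "" <;> simp [h, ih]

-- in a ≤-sorted list whose elements all dominate x, dropping the leading x-run drops every x
lemma not_mem_dropWhile_self (x : String) (xs : List String)
    (h1 : xs.Pairwise (· ≤ ·)) (h2 : ∀ y ∈ xs, x ≤ y) :
    x ∉ xs.dropWhile (· == x) := by
  induction xs with
  | nil => simp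
  | cons y ys ih =>
    by_cases hy : y = x
    · subst hy
      rw [List.dropWhile_cons_of_pos (by simp)]
      exact ih h1.of_cons (fun z hz => h2 z (List.mem_cons_of_mem _ hz))
    · rw [List.dropWhile_cons_of_neg (by simpa using hy)]
      intro hmem
      rcases List.mem_cons.mp hmem with h | h
      · exact hy h.symm
      · have hyx : y ≤ x := List.rel_of_pairwise_cons h1 h
        have hxy : x ≤ y := h2 y (List.mem_cons_self)
        exact hy (le_antisymm hyx hxy)

-- run-length scan of a ≤-sorted list, read back as a dict: looking up n yields its multiplicity
lemma runs_get? (s : List String) (hs : s.Pairwise (· ≤ ·)) (n : String) :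
    (PySem.Dict.mk (pvRuns s)).get? n
      = if n ∈ s then some ((s.count n : Int)) else none := by
  induction s using pvRuns.induct with
  | case1 => simp [pvRuns, PySem.Dict.get?]
  | case2 x xs ih =>
    rw [pvRuns]
    have hxle : ∀ y ∈ xs, x ≤ y := fun y hy => List.rel_of_pairwise_cons hs hy
    have hrest : (xs.dropWhile (· == x)).Pairwise (· ≤ ·) :=
      List.Pairwise.sublist (List.dropWhile_sublist _) hs.of_cons
    have hsplit : xs.takeWhile (· == x) ++ xs.dropWhile (· == x) = xs :=
      List.takeWhile_append_dropWhile
    rw [PySem.Dict.get?_mk_cons, ih hrest]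
    by_cases hnx : n = x
    · subst hnx
      rw [if_pos (by simp)]
      have hc : (xs.takeWhile (· == n)).count n = (xs.takeWhile (· == n)).length :=
        List.count_eq_length.mpr (fun a ha => by
          have h := List.mem_takeWhile_imp (p := (· == n)) ha
          exact (beq_iff_eq.mp h).symm)
      have hc2 : (xs.dropWhile (· == n)).count n = 0 :=
        List.count_eq_zero.mpr (not_mem_dropWhile_self n xs hs.of_cons hxle)
      have hxs : xs.count n = (xs.takeWhile (· == n)).length := by
        conv_lhs => rw [← hsplit]
        rw [List.count_append, hc, hc2]; omega
      simp only [List.count_cons_self, hxs]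
      rw [if_pos List.mem_cons_self]
      push_cast
      ring_nf
    · rw [if_neg (by simpa using fun h : x = n => hnx h.symm)]
      have ht0 : n ∉ xs.takeWhile (· == x) := fun h => by
        have := List.mem_takeWhile_imp h; exact hnx (by simpa using this)
      have hcount : xs.count n = (xs.dropWhile (· == x)).count n := by
        conv_lhs => rw [← hsplit]
        rw [List.count_append, List.count_eq_zero.mpr ht0]; ring
      have hmem : n ∈ xs ↔ n ∈ xs.dropWhile (· == x) := by
        constructor
        · intro h
          rw [← hsplit] at h
          rcases List.mem_append.mp h with h | h
          · exact absurd h ht0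
          · exact h
        · intro h; exact (List.dropWhile_sublist _).mem h
      have hxn : ¬ x = n := fun h => hnx h.symm
      simp [hnx, hmem, hcount, hxn]

lemma runs_getD (s : List String) (hs : s.Pairwise (· ≤ ·)) (n : String) (hn : n ∈ s) :
    (PySem.Dict.mk (pvRuns s)).getD n 0 = (s.count n : Int) := by
  simp [PySem.Dict.getD, runs_get? s hs n, hn]

-- B's output pass: the seen-guarded insert loop emits the distinct names with big counts,
-- in first-occurrence order
lemma foldl_seen_items (c : String → Int) (l : List String) :
    ((l.foldl (fun d n => if ¬ d.contains n ∧ c n > 1 then d.insert n (c n) else d)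
        PySem.Dict.empty).items)
      = ((PySem.Set.ofList l).filter (fun n => decide (c n > 1))).map (fun n => (n, c n)) := by
  induction l using List.reverseRecOn with
  | nil => rfl
  | append_singleton xs x ih =>
    rw [List.foldl_append, List.foldl_cons, List.foldl_nil, PySem.Set.ofList_append_singleton]
    set d := xs.foldl (fun d n => if ¬ d.contains n ∧ c n > 1 then d.insert n (c n) else d)
        PySem.Dict.empty with hd
    have hkeys : d.keys = ((PySem.Set.ofList xs).filter (fun n => decide (c n > 1))) := by
      simp only [PySem.Dict.keys, ih, List.map_map]
      have h1 : ((fun p : String × Int => p.1) ∘ fun n => (n, c n)) = fun n => n := rfl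
      rw [h1, List.map_id']
    have hcontains : ∀ n, d.contains n = true ↔ (n ∈ PySem.Set.ofList xs ∧ c n > 1) := by
      intro n
      rw [PySem.Dict.contains_iff_mem_keys, hkeys, List.mem_filter]
      constructor
      · rintro ⟨h1, h2⟩; exact ⟨h1, by simpa using h2⟩
      · rintro ⟨h1, h2⟩; exact ⟨h1, by simpa using h2⟩
    by_cases hc1 : c x > 1
    · by_cases hx : x ∈ PySem.Set.ofList xs
      · rw [PySem.Set.add_of_mem hx]
        rw [if_neg (fun h => h.1 ((hcontains x).mpr ⟨hx, hc1⟩))]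
        exact ih
      · rw [PySem.Set.add_of_not_mem hx]
        rw [if_pos ⟨fun h => hx ((hcontains x).mp h).1, hc1⟩]
        have hcf : d.contains x = false := by
          rw [Bool.eq_false_iff, Ne]; intro h; exact hx ((hcontains x).mp h).1
        rw [PySem.Dict.items_insert_of_not_contains _ _ hcf, ih, List.filter_append,
          List.map_append]
        simp [hc1]
    · rw [if_neg (fun h => hc1 h.2)]
      by_cases hx : x ∈ PySem.Set.ofList xs
      · rw [PySem.Set.add_of_mem hx]; exact ih
      · rw [PySem.Set.add_of_not_mem hx, List.filter_append]
        simp only [List.filter_cons, List.filter_nil]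
        rw [if_neg (by simpa using hc1)]
        rw [List.append_nil]
        exact ih

-- ===== VERDICT (by name: the statement is the Claim_ definition above) =====
theorem summarize_exact_duplicates_spec : Claim_equal_summarize_exact_duplicates := by
  intro entities _
  unfold Spec_summarize_exact_duplicates summarize_exact_duplicates summarize_exact_duplicates_alt
  simp only []
  -- B's append loop builds exactly the nonempty cleaned names, in order
  rw [PySem.List.foldl_append_ite (p := fun e => pvName e ≠ "") (f := fun e => pvName e),
    List.nil_append]
  have hnames : (entities.filter (fun e => decide (pvName e ≠ ""))).map (fun e => pvName e)
      = (entities.map (fun e => pvName e)).filter (fun n => n ≠ "") := by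
    rw [List.filter_map]; rfl
  rw [hnames]
  set names : List String := (entities.map (fun e => pvName e)).filter (fun n => n ≠ "") with hn
  -- A side: tally = Counter(names), then the filtered-insert loop over its items
  rw [skip_fold, ← hn, ← PySem.Dict.counter_eq_foldl]
  rw [PySem.List.foldl_ite_eq_foldl_filter (p := fun p : String × Int => p.2 > 1)
    (f := fun (d : PySem.Dict String Int) (p : String × Int) => d.insert p.1 p.2)]
  rw [PySem.Dict.items_counter, List.filter_map, List.foldl_map]
  simp only [Function.comp_def]
  rw [foldl_insert_items, ofList_filter _ (PySem.Set.ofList names), PySem.Set.ofList_ofList]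
  -- B side: the sorted run-length counts agree with Counter's counts on every name
  have hsorted : (PySem.List.sorted names (fun x => x) false).Pairwise (· ≤ ·) :=
    PySem.List.sorted_pairwise names (fun x => x)
  have hgetD : ∀ n ∈ names,
      (PySem.Dict.mk (pvRuns (PySem.List.sorted names (fun x => x) false))).getD n 0
        = (names.count n : Int) := by
    intro n hnm
    rw [runs_getD _ hsorted n ((PySem.List.mem_sorted names (fun x => x) false n).mpr hnm),
      (PySem.List.sorted_perm names (fun x => x) false).count_eq]
  rw [PySem.List.foldl_congr_mem
    (l := names) (init := (PySem.Dict.empty : PySem.Dict String Int))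
    (f := fun (d : PySem.Dict String Int) n =>
      if ¬ d.contains n ∧ (PySem.Dict.mk (pvRuns (PySem.List.sorted names (fun x => x) false))).getD n 0 > 1
      then d.insert n ((PySem.Dict.mk (pvRuns (PySem.List.sorted names (fun x => x) false))).getD n 0) else d)
    (g := fun (d : PySem.Dict String Int) n =>
      if ¬ d.contains n ∧ (names.count n : Int) > 1
      then d.insert n ((names.count n : Int)) else d)
    (fun acc x hx => by simp only [hgetD x hx])]
  rw [foldl_seen_items]
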